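-- pv_equiv track=rewrite | github.com/jccollinsdev/clavis | backend/app/pipeline/macro_classifier.py | _normalize_position_impacts
-- ===== SOURCE A (Python) =====
-- def _normalize_ticker(value: str | None) -> str:
--     return str(value or "").strip().upper()
--
-- def _normalize_position_impacts(
--     raw_impacts: list[dict], positions: list[dict]
-- ) -> list[dict]:
--     impact_map: dict[str, dict] = {}
--     for item in raw_impacts or []:
--         if not isinstance(item, dict):
--             continue
--         ticker = _normalize_ticker(item.get("ticker"))
--         if not ticker:
--             continue
--         impact_map[ticker] = {
--             "ticker": ticker,
--             "macro_relevance": str(item.get("macro_relevance") or "neutral")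
--             .strip()
--             .lower()
--             or "neutral",
--             "impact_summary": str(item.get("impact_summary") or "").strip(),
--         }
--
--     normalized = []
--     for position in positions:
--         ticker = _normalize_ticker(position.get("ticker"))
--         if not ticker:
--             continue
--         impact = impact_map.get(ticker)
--         if impact and impact.get("impact_summary"):
--             normalized.append(impact)
--             continue
--         normalized.append(
--             {
--                 "ticker": ticker,
--                 "macro_relevance": "neutral",
--                 "impact_summary": "No clear overnight macro read-through for this holding; keep the focus on company-specific developments unless new sector news broadens out.",
--             }
--         )
--     return normalized
-- ===== SOURCE B (Python) =====
-- def _normalize_ticker(value):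
--     return str(value or "").strip().upper()
--
--
-- _DEFAULT_SUMMARY = (
--     "No clear overnight macro read-through for this holding; keep the focus on "
--     "company-specific developments unless new sector news broadens out."
-- )
--
--
-- def _normalize_position_impacts(raw_impacts, positions):
--     # Dict-free decomposition: per position, scan raw_impacts for the LAST
--     # item whose normalized ticker matches, and normalize only that one.
--     normalized = []
--     for position in positions:
--         pt = _normalize_ticker(position.get("ticker"))
--         if not pt:
--             continue
--         best = None
--         for item in raw_impacts or []:
--             if not isinstance(item, dict):
--                 continue
--             if _normalize_ticker(item.get("ticker")) == pt:
--                 best = item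
--         entry = None
--         if best is not None:
--             summary = str(best.get("impact_summary") or "").strip()
--             if summary:
--                 entry = {
--                     "ticker": pt,
--                     "macro_relevance": str(best.get("macro_relevance") or "neutral").strip().lower() or "neutral",
--                     "impact_summary": summary,
--                 }
--         if entry is None:
--             entry = {
--                 "ticker": pt,
--                 "macro_relevance": "neutral",
--                 "impact_summary": _DEFAULT_SUMMARY,
--             }
--         normalized.append(entry)
--     return normalized
-- ===== Notes on version B (the rewrite author's own statement) =====
-- stated objective: alternative
-- what changed: B drops the impact_map dict entirely: for each position it scans raw_impacts for the last item with a matching normalized ticker and normalizes only that item on the spot, instead of pre-normalizing everything into a dict.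
import Mathlib
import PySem

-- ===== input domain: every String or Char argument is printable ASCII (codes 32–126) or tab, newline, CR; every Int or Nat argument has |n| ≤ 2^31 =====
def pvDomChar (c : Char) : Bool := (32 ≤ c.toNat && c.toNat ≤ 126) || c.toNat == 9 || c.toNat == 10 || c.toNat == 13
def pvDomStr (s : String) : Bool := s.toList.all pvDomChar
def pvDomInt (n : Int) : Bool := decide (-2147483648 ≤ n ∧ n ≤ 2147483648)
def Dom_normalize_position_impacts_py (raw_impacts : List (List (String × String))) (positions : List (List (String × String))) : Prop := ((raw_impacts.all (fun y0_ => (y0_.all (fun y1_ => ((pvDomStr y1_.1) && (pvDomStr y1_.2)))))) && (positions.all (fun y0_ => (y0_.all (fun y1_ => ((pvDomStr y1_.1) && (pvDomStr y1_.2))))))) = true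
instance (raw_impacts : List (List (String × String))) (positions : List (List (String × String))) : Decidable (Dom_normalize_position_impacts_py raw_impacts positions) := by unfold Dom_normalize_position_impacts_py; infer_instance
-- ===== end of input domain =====

-- B replaces A's pre-built impact_map dict by a direct per-position scan of raw_impacts
-- (last match wins), a genuinely different decomposition of the same task ("alternative").

-- ===== PORT A =====
-- dict.get(k) on an input dict (assoc list, first match wins)
def pvGetS (d : List (String × String)) (k : String) : Option String :=
  (d.find? (fun p => p.1 == k)).map (·.2)

-- _normalize_ticker(value): str(value or "").strip().upper()
def pvNormTicker (v : Option String) : String :=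
  PySem.Str.upper (PySem.Str.strip (v.getD ""))

-- str(item.get("macro_relevance") or "neutral").strip().lower() or "neutral"
def pvRelOf (item : List (String × String)) : String :=
  let mr0 := (pvGetS item "macro_relevance").getD ""
  let mr1 := if mr0 = "" then "neutral" else mr0
  let mr2 := PySem.Str.lower (PySem.Str.strip mr1)
  if mr2 = "" then "neutral" else mr2

-- value stored by A's first loop for a matching item
def pvNormImpact (t : String) (item : List (String × String)) : List (String × String) :=
  [("ticker", t),
   ("macro_relevance", pvRelOf item),
   ("impact_summary", PySem.Str.strip ((pvGetS item "impact_summary").getD ""))]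

def pvDefault (t : String) : List (String × String) :=
  [("ticker", t),
   ("macro_relevance", "neutral"),
   ("impact_summary", "No clear overnight macro read-through for this holding; keep the focus on company-specific developments unless new sector news broadens out.")]

-- first loop of A (the isinstance(item, dict) guard is always true under the type convention)
def pvBuildMap (raw_impacts : List (List (String × String))) : PySem.Dict String (List (String × String)) :=
  raw_impacts.foldl
    (fun m item =>
      let t := pvNormTicker (pvGetS item "ticker")
      if t = "" then m else m.insert t (pvNormImpact t item))
    PySem.Dict.empty

def normalize_position_impacts_py (raw_impacts : List (List (String × String))) (positions : List (List (String × String))) : List (List (String × String)) :=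
  let impact_map := pvBuildMap raw_impacts
  positions.foldl
    (fun acc position =>
      let t := pvNormTicker (pvGetS position "ticker")
      if t = "" then acc
      else
        match impact_map.get? t with
        | some impact =>
            -- `if impact and impact.get("impact_summary")`: truthiness of the dict and of the string
            if impact ≠ [] ∧ (pvGetS impact "impact_summary").getD "" ≠ "" then acc ++ [impact]
            else acc ++ [pvDefault t]
        | none => acc ++ [pvDefault t])
    []

-- ===== PORT B =====
-- inner scan of B: last item of raw_impacts whose normalized ticker equals t
def pvLastMatch (raw_impacts : List (List (String × String))) (t : String) : Option (List (String × String)) :=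
  raw_impacts.foldl
    (fun best item => if pvNormTicker (pvGetS item "ticker") = t then some item else best)
    none

def normalize_position_impacts_py_alt (raw_impacts : List (List (String × String))) (positions : List (List (String × String))) : List (List (String × String)) :=
  positions.foldl
    (fun acc position =>
      let t := pvNormTicker (pvGetS position "ticker")
      if t = "" then acc
      else
        match pvLastMatch raw_impacts t with
        | none => acc ++ [pvDefault t]
        | some best =>
            let summary := PySem.Str.strip ((pvGetS best "impact_summary").getD "")
            if summary = "" then acc ++ [pvDefault t]
            else acc ++ [[("ticker", t), ("macro_relevance", pvRelOf best), ("impact_summary", summary)]])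
    []

-- ===== PRECONDITION & SPEC =====
def Spec_normalize_position_impacts_py (raw_impacts : List (List (String × String))) (positions : List (List (String × String))) (out : List (List (String × String))) : Prop := out = normalize_position_impacts_py_alt raw_impacts positions
instance (raw_impacts : List (List (String × String))) (positions : List (List (String × String))) (out : List (List (String × String))) : Decidable (Spec_normalize_position_impacts_py raw_impacts positions out) := by unfold Spec_normalize_position_impacts_py; infer_instance

-- ===== CLAIM (what is proved, stated in full; the proofs are below) =====
def Claim_equal_normalize_position_impacts_py : Prop := ∀ (raw_impacts : List (List (String × String))) (positions : List (List (String × String))), Dom_normalize_position_impacts_py raw_impacts positions → Spec_normalize_position_impacts_py raw_impacts positions (normalize_position_impacts_py raw_impacts positions)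

-- ===== LEMMAS AND PROOFS =====

-- invariant tying A's dict to B's last-match scan, stepped over raw_impacts
theorem pv_map_lastMatch (t : String) (ht : t ≠ "") :
    ∀ (raw : List (List (String × String))) (d : PySem.Dict String (List (String × String)))
      (b : Option (List (String × String))),
      d.get? t = b.map (fun item => pvNormImpact t item) →
      (raw.foldl
        (fun m item =>
          let s := pvNormTicker (pvGetS item "ticker")
          if s = "" then m else m.insert s (pvNormImpact s item)) d).get? t
      = (raw.foldl
          (fun best item => if pvNormTicker (pvGetS item "ticker") = t then some item else best) b).map
          (fun item => pvNormImpact t item) := by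
  intro raw
  induction raw with
  | nil => intro d b h; simpa using h
  | cons item rest ih =>
      intro d b h
      simp only [List.foldl_cons]
      by_cases hs : pvNormTicker (pvGetS item "ticker") = t
      · rw [if_pos hs]
        rw [hs, if_neg ht]
        exact ih _ _ (by simp [PySem.Dict.get?_insert_self])
      · rw [if_neg hs]
        by_cases he : pvNormTicker (pvGetS item "ticker") = ""
        · rw [if_pos he]; exact ih _ _ h
        · rw [if_neg he]
          exact ih _ _ (by rw [PySem.Dict.get?_insert_of_ne d _ (fun hq => hs hq.symm)]; exact h)

theorem pv_lookup (raw : List (List (String × String))) (t : String) (ht : t ≠ "") :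
    (pvBuildMap raw).get? t = (pvLastMatch raw t).map (fun item => pvNormImpact t item) := by
  unfold pvBuildMap pvLastMatch
  exact pv_map_lastMatch t ht raw PySem.Dict.empty none (by simp [PySem.Dict.empty, PySem.Dict.get?])

-- the per-position steps of the two folds agree
theorem pv_step_eq (raw : List (List (String × String)))
    (acc : List (List (String × String))) (position : List (String × String)) :
    (fun acc position =>
      let t := pvNormTicker (pvGetS position "ticker")
      if t = "" then acc
      else
        match (pvBuildMap raw).get? t with
        | some impact =>
            if impact ≠ [] ∧ (pvGetS impact "impact_summary").getD "" ≠ "" then acc ++ [impact]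
            else acc ++ [pvDefault t]
        | none => acc ++ [pvDefault t]) acc position
    = (fun acc position =>
      let t := pvNormTicker (pvGetS position "ticker")
      if t = "" then acc
      else
        match pvLastMatch raw t with
        | none => acc ++ [pvDefault t]
        | some best =>
            let summary := PySem.Str.strip ((pvGetS best "impact_summary").getD "")
            if summary = "" then acc ++ [pvDefault t]
            else acc ++ [[("ticker", t), ("macro_relevance", pvRelOf best), ("impact_summary", summary)]]) acc position := by
  by_cases ht : pvNormTicker (pvGetS position "ticker") = ""
  · simp [ht]
  · simp only [if_neg ht, pv_lookup raw _ ht]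
    cases hlm : pvLastMatch raw (pvNormTicker (pvGetS position "ticker")) with
    | none => simp
    | some best =>
        simp only [Option.map_some]
        have hget : (pvGetS (pvNormImpact (pvNormTicker (pvGetS position "ticker")) best) "impact_summary").getD ""
            = PySem.Str.strip ((pvGetS best "impact_summary").getD "") := by
          simp [pvNormImpact, pvGetS, List.find?]
        by_cases hz : PySem.Str.strip ((pvGetS best "impact_summary").getD "") = ""
        · rw [if_neg (fun h => h.2 (hget.trans hz)), if_pos hz]
        · rw [if_pos ⟨by simp [pvNormImpact], fun h => hz (hget.symm.trans h)⟩, if_neg hz]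
          simp [pvNormImpact]

-- ===== VERDICT (by name: the statement is the Claim_ definition above) =====
theorem normalize_position_impacts_py_spec : Claim_equal_normalize_position_impacts_py := by
  intro raw positions _
  unfold Spec_normalize_position_impacts_py normalize_position_impacts_py normalize_position_impacts_py_alt
  exact PySem.List.foldl_congr_mem positions _ _ [] (fun acc position _ => pv_step_eq raw acc position)
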